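-- pv_equiv track=rewrite | github.com/juancontreras1145/ESP32-JC | main.py | _parse_first_from_array
-- ===== SOURCE A (Python) =====
-- def _parse_first_from_array(key, txt):
--     i = txt.find(key)
--     if i < 0:
--         return None
--     j = i + len(key)
--     out = ""
--     while j < len(txt):
--         ch = txt[j]
--         if ch == '"' or ch == "," or ch == "]":
--             break
--         out += ch
--         j += 1
--     return out
-- ===== SOURCE B (Python) =====
-- def _parse_first_from_array(key, txt):
--     i = txt.find(key)
--     if i < 0:
--         return None
--     j = i + len(key)
--     end = len(txt)
--     for d in '",]':
--         k = txt.find(d, j)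
--         if k != -1 and k < end:
--             end = k
--     return txt[j:end]
-- ===== Notes on version B (the rewrite author's own statement) =====
-- stated objective: idiomatic
-- what changed: Replaces A's per-character while-loop that accumulates the result by string concatenation with three str.find calls (one per delimiter) that compute the end position directly, returning a single slice txt[j:end].
import Mathlib
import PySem

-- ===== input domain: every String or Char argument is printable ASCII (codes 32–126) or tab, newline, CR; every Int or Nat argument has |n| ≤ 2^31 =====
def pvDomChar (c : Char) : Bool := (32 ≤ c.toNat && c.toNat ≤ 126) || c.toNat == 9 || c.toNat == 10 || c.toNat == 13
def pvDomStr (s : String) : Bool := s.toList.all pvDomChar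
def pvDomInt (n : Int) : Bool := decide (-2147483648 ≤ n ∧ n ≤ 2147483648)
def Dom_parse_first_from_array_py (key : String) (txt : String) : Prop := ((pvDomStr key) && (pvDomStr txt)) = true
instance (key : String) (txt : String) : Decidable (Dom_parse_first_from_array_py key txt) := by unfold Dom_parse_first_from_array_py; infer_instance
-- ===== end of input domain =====

-- B replaces A's per-character while loop by three str.find calls and one slice (same return value; no side effects involved).

-- ===== PORT A =====
-- the while loop of A: j scans txt from index j (always ≥ 0 at every call) until a delimiter, appending to out
def pvALoop (cs : List Char) (j : Int) (out : List Char) : List Char :=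
  if _h : j < (cs.length : Int) then
    match PySem.List.pyGet? cs j with
    | none => out   -- unreachable: every call passes 0 ≤ j, and j < len here
    | some ch =>
      if ch = '"' ∨ ch = ',' ∨ ch = ']' then out
      else pvALoop cs (j + 1) (out ++ [ch])
  else out
termination_by (cs.length - j).toNat
decreasing_by omega

def parse_first_from_array_py (key : String) (txt : String) : Option String :=
  let i := PySem.Str.find txt key
  if i < 0 then none
  else some (String.ofList (pvALoop txt.toList (i + PySem.Str.len key) []))

-- ===== PORT B =====
def parse_first_from_array_py_alt (key : String) (txt : String) : Option String :=
  let i := PySem.Str.find txt key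
  if i < 0 then none
  else
    let j := i + PySem.Str.len key
    let e := (['"', ',', ']'] : List Char).foldl
      (fun e d =>
        let k := PySem.Str.findFrom txt (String.ofList [d]) j
        if k ≠ -1 ∧ k < e then k else e)
      (PySem.Str.len txt)
    some (PySem.Str.slice txt (some j) (some e))

-- ===== PRECONDITION & SPEC =====
def Spec_parse_first_from_array_py (key : String) (txt : String) (out : Option String) : Prop := out = parse_first_from_array_py_alt key txt
instance (key : String) (txt : String) (out : Option String) : Decidable (Spec_parse_first_from_array_py key txt out) := by unfold Spec_parse_first_from_array_py; infer_instance

-- ===== CLAIM (what is proved, stated in full; the proofs are below) =====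
def Claim_equal_parse_first_from_array_py : Prop := ∀ (key : String) (txt : String), Dom_parse_first_from_array_py key txt → Spec_parse_first_from_array_py key txt (parse_first_from_array_py key txt)

-- ===== LEMMAS AND PROOFS =====

-- proof-only abbreviations
def pvDelim (c : Char) : Bool := c == '"' || c == ',' || c == ']'
def pvStep (k e : Int) : Int := if k ≠ -1 ∧ k < e then k else e
def pvEnd (t : List Char) : Int :=
  (['"', ',', ']'] : List Char).foldl (fun e d => pvStep (PySem.Chars.find t [d]) e) (t.length : Int)

lemma pvALoop_eq (cs : List Char) (j0 : Nat) (out : List Char) :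
    pvALoop cs (j0 : Int) out = out ++ (cs.drop j0).takeWhile (fun c => !(pvDelim c)) := by
  by_cases h : j0 < cs.length
  · rw [pvALoop]
    have hlt : (j0 : Int) < (cs.length : Int) := by exact_mod_cast h
    rw [dif_pos hlt, PySem.List.pyGet?_natCast, List.getElem?_eq_getElem h]
    simp only
    rw [List.drop_eq_getElem_cons h, List.takeWhile_cons]
    by_cases hd : cs[j0] = '"' ∨ cs[j0] = ',' ∨ cs[j0] = ']'
    · rw [if_pos hd]
      have : pvDelim cs[j0] = true := by
        unfold pvDelim; rcases hd with h1 | h1 | h1 <;> simp [h1]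
      simp [this]
    · rw [if_neg hd]
      have : pvDelim cs[j0] = false := by
        unfold pvDelim
        simp only [Bool.or_eq_false_iff, beq_eq_false_iff_ne]
        exact ⟨⟨fun h => hd (Or.inl h), fun h => hd (Or.inr (Or.inl h))⟩,
          fun h => hd (Or.inr (Or.inr h))⟩
      have hrec := pvALoop_eq cs (j0 + 1) (out ++ [cs[j0]])
      push_cast at hrec
      rw [hrec]
      simp [this]
  · rw [pvALoop]
    have hge : ¬ ((j0 : Int) < (cs.length : Int)) := by exact_mod_cast h
    rw [dif_neg hge, List.drop_eq_nil_of_le (by omega)]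
    simp
termination_by cs.length - j0
decreasing_by omega

lemma singleton_prefix_iff (d : Char) (u : List Char) : [d] <+: u ↔ u.head? = some d := by
  cases u with
  | nil => simp
  | cons c t =>
    simp only [List.cons_prefix_cons, List.nil_prefix, and_true, List.head?_cons,
      Option.some_inj]
    exact eq_comm

lemma find_single_nil (d : Char) : PySem.Chars.find [] [d] = -1 := by
  rw [PySem.Chars.find_eq_neg_one_iff]
  simp

lemma find_single_cons (c : Char) (t : List Char) (d : Char) :
    PySem.Chars.find (c :: t) [d] =
      if c = d then 0
      else if PySem.Chars.find t [d] = -1 then -1 else PySem.Chars.find t [d] + 1 := by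
  by_cases hc : c = d
  · subst hc
    have hmem : (c : Char) ∈ c :: t := List.mem_cons_self
    have hnn : 0 ≤ PySem.Chars.find (c :: t) [c] := by
      rw [PySem.Chars.find_nonneg_iff, List.singleton_infix_iff]; exact hmem
    obtain ⟨hpre, hmin⟩ := PySem.Chars.find_spec hnn
    have h0 : [c] <+: List.drop 0 (c :: t) := by
      rw [List.drop_zero, singleton_prefix_iff]
      simp
    have : (PySem.Chars.find (c :: t) [c]).toNat = 0 := by
      by_contra hne
      exact hmin 0 (by omega) h0
    rw [if_pos rfl]
    omega
  · by_cases ht : PySem.Chars.find t [d] = -1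
    · have hnot : d ∉ t := by
        rw [PySem.Chars.find_eq_neg_one_iff, List.singleton_infix_iff] at ht; exact ht
      rw [if_neg hc, if_pos ht, PySem.Chars.find_eq_neg_one_iff, List.singleton_infix_iff]
      simp only [List.mem_cons, not_or]
      exact ⟨fun h => hc h.symm, hnot⟩
    · have htn : 0 ≤ PySem.Chars.find t [d] := by
        have := PySem.Chars.neg_one_le_find t [d]; omega
      obtain ⟨hpre_t, hmin_t⟩ := PySem.Chars.find_spec htn
      set m := (PySem.Chars.find t [d]).toNat with hm
      have hmem : d ∈ c :: t := by
        rw [PySem.Chars.find_nonneg_iff, List.singleton_infix_iff] at htn; exact List.mem_cons_of_mem c htn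
      have hnn : 0 ≤ PySem.Chars.find (c :: t) [d] := by
        rw [PySem.Chars.find_nonneg_iff, List.singleton_infix_iff]; exact hmem
      obtain ⟨hpre, hmin⟩ := PySem.Chars.find_spec hnn
      set k := (PySem.Chars.find (c :: t) [d]).toNat with hk
      have hk0 : k ≠ 0 := by
        intro h0
        rw [h0] at hpre
        rw [singleton_prefix_iff] at hpre
        simp at hpre
        exact hc hpre
      have hle1 : k ≤ m + 1 := by
        by_contra hgt
        exact hmin (m + 1) (by omega) (by simpa using hpre_t)
      have hle2 : m + 1 ≤ k := by
        by_contra hgt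
        have hk1 : k - 1 < m := by omega
        apply hmin_t (k - 1) hk1
        have : List.drop k (c :: t) = List.drop (k - 1) t := by
          have : k = (k - 1) + 1 := by omega
          rw [this]; simp
        rw [← this]; exact hpre
      rw [if_neg hc, if_neg ht]
      omega

lemma pvStep_nonneg (k e : Int) (hk : -1 ≤ k) (he : 0 ≤ e) : 0 ≤ pvStep k e := by
  unfold pvStep; split_ifs with h
  · omega
  · exact he

lemma pvFold_shift (ds : List Char) (k : Char → Int) (b n : Int)
    (hb : 0 ≤ b) (hn : 0 ≤ n) (hk : ∀ d ∈ ds, -1 ≤ k d) :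
    ds.foldl (fun e d => pvStep (if k d = -1 then -1 else n + k d) e) (n + b)
      = n + ds.foldl (fun e d => pvStep (k d) e) b := by
  induction ds generalizing b with
  | nil => simp
  | cons d ds ih =>
    simp only [List.foldl_cons]
    have hkd : -1 ≤ k d := hk d List.mem_cons_self
    have hstep : pvStep (if k d = -1 then -1 else n + k d) (n + b) = n + pvStep (k d) b := by
      unfold pvStep
      by_cases h1 : k d = -1
      · simp [h1]
      · rw [if_neg h1]
        have hk0 : 0 ≤ k d := by omega
        by_cases h2 : k d < b
        · rw [if_pos (by constructor <;> omega), if_pos ⟨h1, h2⟩]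
        · rw [if_neg (by intro h; exact h2 (by omega)), if_neg (by intro h; exact h2 h.2)]
    rw [hstep, ih _ (pvStep_nonneg _ _ hkd hb) (fun x hx => hk x (List.mem_cons_of_mem d hx))]

lemma pvEnd_nil : pvEnd [] = 0 := by
  unfold pvEnd
  simp [find_single_nil, pvStep]

lemma pvEnd_cons_delim (c : Char) (t : List Char) (hc : pvDelim c = true) :
    pvEnd (c :: t) = 0 := by
  have hq : c = '"' ∨ c = ',' ∨ c = ']' := by
    unfold pvDelim at hc; simp at hc
    rcases hc with hc | hc
    · rcases hc with hc | hc
      · exact Or.inl hc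
      · exact Or.inr (Or.inl hc)
    · exact Or.inr (Or.inr hc)
  have h1 := PySem.Chars.neg_one_le_find t ['"']
  have h2 := PySem.Chars.neg_one_le_find t [',']
  have h3 := PySem.Chars.neg_one_le_find t [']']
  unfold pvEnd
  simp only [List.foldl_cons, List.foldl_nil, List.length_cons]
  rcases hq with hq | hq | hq
  · rw [hq, find_single_cons _ t '"', find_single_cons _ t ',', find_single_cons _ t ']',
      if_pos rfl, if_neg (by decide : ¬('"' : Char) = ','), if_neg (by decide : ¬('"' : Char) = ']')]
    unfold pvStep
    split_ifs <;> push_cast <;> omega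
  · rw [hq, find_single_cons _ t '"', find_single_cons _ t ',', find_single_cons _ t ']',
      if_pos rfl, if_neg (by decide : ¬(',' : Char) = '"'), if_neg (by decide : ¬(',' : Char) = ']')]
    unfold pvStep
    split_ifs <;> push_cast <;> omega
  · rw [hq, find_single_cons _ t '"', find_single_cons _ t ',', find_single_cons _ t ']',
      if_pos rfl, if_neg (by decide : ¬(']' : Char) = '"'), if_neg (by decide : ¬(']' : Char) = ',')]
    unfold pvStep
    split_ifs <;> push_cast <;> omega

lemma pvEnd_cons_not_delim (c : Char) (t : List Char) (hc : pvDelim c = false) :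
    pvEnd (c :: t) = pvEnd t + 1 := by
  have hne : c ≠ '"' ∧ c ≠ ',' ∧ c ≠ ']' := by
    unfold pvDelim at hc
    simp only [Bool.or_eq_false_iff, beq_eq_false_iff_ne] at hc
    exact ⟨hc.1.1, hc.1.2, hc.2⟩
  have hfind : ∀ d ∈ (['"', ',', ']'] : List Char),
      PySem.Chars.find (c :: t) [d]
        = if PySem.Chars.find t [d] = -1 then -1 else 1 + PySem.Chars.find t [d] := by
    intro d hd
    rw [find_single_cons]
    have hcd : c ≠ d := by
      simp only [List.mem_cons, List.not_mem_nil, or_false] at hd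
      rcases hd with h | h | h
      · rw [h]; exact hne.1
      · rw [h]; exact hne.2.1
      · rw [h]; exact hne.2.2
    rw [if_neg hcd]
    split_ifs <;> omega
  unfold pvEnd
  rw [PySem.List.foldl_congr_mem _ _
        (fun e d => pvStep (if PySem.Chars.find t [d] = -1 then -1 else 1 + PySem.Chars.find t [d]) e) _
        (fun acc x hx => by rw [hfind x hx])]
  have : ((c :: t).length : Int) = 1 + (t.length : Int) := by simp; omega
  rw [this, pvFold_shift _ _ _ _ (by positivity) (by norm_num)
        (fun d _ => PySem.Chars.neg_one_le_find t [d])]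
  omega

lemma pvEnd_eq_takeWhile_length (t : List Char) :
    pvEnd t = (((t.takeWhile (fun c => !(pvDelim c))).length : Nat) : Int) := by
  induction t with
  | nil => simp [pvEnd_nil]
  | cons c t ih =>
    by_cases hc : pvDelim c = true
    · rw [pvEnd_cons_delim c t hc, List.takeWhile_cons]
      simp [hc]
    · have hc' : pvDelim c = false := by simpa using hc
      rw [pvEnd_cons_not_delim c t hc', List.takeWhile_cons, ih]
      simp [hc']

-- the scanned suffix starts inside txt: find succeeded, so key occurs at i and i+len(key) ≤ len(txt)
lemma find_add_len_le (cs sub : List Char) (h : 0 ≤ PySem.Chars.find cs sub) :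
    (PySem.Chars.find cs sub).toNat + sub.length ≤ cs.length := by
  obtain ⟨hpre, _⟩ := PySem.Chars.find_spec h
  have hlen := hpre.length_le
  have hfl := PySem.Chars.find_le_length cs sub
  simp [List.length_drop] at hlen
  omega

-- the fold of B over the three delimiters, rewritten through findFrom into j0 + pvEnd of the suffix
lemma pvBfold (txt : String) (j0 : Nat) (h : j0 ≤ txt.toList.length) :
    (['"', ',', ']'] : List Char).foldl
      (fun e d =>
        if PySem.Str.findFrom txt (String.ofList [d]) (j0 : Int) ≠ -1 ∧
            PySem.Str.findFrom txt (String.ofList [d]) (j0 : Int) < e then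
          PySem.Str.findFrom txt (String.ofList [d]) (j0 : Int)
        else e)
      ((txt.toList.length : Nat) : Int)
    = (j0 : Int) + ((((txt.toList.drop j0).takeWhile (fun c => !(pvDelim c))).length : Nat) : Int) := by
  rw [PySem.List.foldl_congr_mem (['"', ',', ']'] : List Char)
      (fun e d =>
        if PySem.Str.findFrom txt (String.ofList [d]) (j0 : Int) ≠ -1 ∧
            PySem.Str.findFrom txt (String.ofList [d]) (j0 : Int) < e then
          PySem.Str.findFrom txt (String.ofList [d]) (j0 : Int)
        else e)
      (fun e d =>
        pvStep (if PySem.Chars.find (txt.toList.drop j0) [d] = -1 then -1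
                else (j0 : Int) + PySem.Chars.find (txt.toList.drop j0) [d]) e)
      _
      (by
        intro acc x _
        simp only [PySem.Str.findFrom_eq]
        rw [show (String.ofList [x]).toList = [x] from by simp]
        rw [PySem.Chars.findFrom_natCast txt.toList [x] j0 h]
        rfl)]
  rw [show ((txt.toList.length : Nat) : Int)
        = (j0 : Int) + (((txt.toList.drop j0).length : Nat) : Int) from by
      rw [List.length_drop]; omega]
  rw [pvFold_shift _ _ _ _ (by positivity) (by positivity)
      (fun d _ => PySem.Chars.neg_one_le_find (txt.toList.drop j0) [d])]
  have : (['"', ',', ']'] : List Char).foldl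
      (fun e d => pvStep (PySem.Chars.find (txt.toList.drop j0) [d]) e)
      (((txt.toList.drop j0).length : Nat) : Int) = pvEnd (txt.toList.drop j0) := rfl
  rw [this, pvEnd_eq_takeWhile_length]

-- ===== VERDICT (by name: the statement is the Claim_ definition above) =====
theorem parse_first_from_array_py_spec : Claim_equal_parse_first_from_array_py := by
  intro key txt _
  unfold Spec_parse_first_from_array_py parse_first_from_array_py parse_first_from_array_py_alt
  simp only [PySem.Str.find_eq, PySem.Str.len_eq]
  by_cases hneg : PySem.Chars.find txt.toList key.toList < 0
  · simp [hneg]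
  · rw [if_neg hneg, if_neg hneg]
    have hnn : 0 ≤ PySem.Chars.find txt.toList key.toList := by omega
    have hle : (PySem.Chars.find txt.toList key.toList).toNat + key.toList.length
        ≤ txt.toList.length := find_add_len_le _ _ hnn
    have hj : PySem.Chars.find txt.toList key.toList + (key.toList.length : Int)
        = ((((PySem.Chars.find txt.toList key.toList).toNat + key.toList.length : Nat)) : Int) := by
      push_cast; omega
    rw [hj]
    set j0 : Nat := (PySem.Chars.find txt.toList key.toList).toNat + key.toList.length with hj0
    rw [pvALoop_eq txt.toList j0 [], pvBfold txt j0 (by omega)]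
    set L : Nat := ((txt.toList.drop j0).takeWhile (fun c => !(pvDelim c))).length with hL
    have hslice : PySem.Str.slice txt (some (j0 : Int)) (some ((j0 : Int) + (L : Int)))
        = String.ofList ((txt.toList.drop j0).take L) := by
      unfold PySem.Str.slice
      rw [show ((j0 : Int) + (L : Int)) = ((j0 + L : Nat) : Int) from by push_cast; ring]
      rw [PySem.Chars.slice_eq_listSlice, PySem.List.slice_natCast]
      congr 1
      rw [show j0 + L - j0 = L from by omega]
    rw [hslice]
    have htake : (txt.toList.drop j0).take L
        = (txt.toList.drop j0).takeWhile (fun c => !(pvDelim c)) := by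
      rw [hL]
      exact (List.prefix_iff_eq_take.mp
        (List.takeWhile_prefix (p := fun c => !(pvDelim c)))).symm
    rw [htake]
    simp
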